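-- pv_equiv track=rewrite | github.com/FissoreD/Advent-of-Code | 2021/src/day3.py | find_best_less
-- ===== SOURCE A (Python) =====
-- def find_best_less(M: list, index: int):
--     nb_of_one = sum([elt[index] == '1' for elt in M])
--     if nb_of_one == len(M) or nb_of_one == 0:
--         return M
--     if nb_of_one * 2 == len(M):
--         return [i for i in M if i[index] == '0']
--     less = '1' if nb_of_one * 2 < len(M) else '0'
--     return [elt for elt in M if elt[index] == less]
-- ===== SOURCE B (Python) =====
-- def find_best_less(M: list, index: int):
--     groups = {}
--     for e in M:
--         groups.setdefault(e[index], []).append(e)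
--     ones = groups.get('1', [])
--     nb = len(ones)
--     if nb == len(M) or nb == 0:
--         return M
--     return ones if nb * 2 < len(M) else groups.get('0', [])
-- ===== Notes on version B (the rewrite author's own statement) =====
-- stated objective: alternative
-- what changed: Builds a dict index grouping the strings by their character at index in one pass (setdefault/append), then selects the answer by pure lookups and length comparison, instead of A's sum-of-booleans count followed by a second filtering pass over M.
import Mathlib
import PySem

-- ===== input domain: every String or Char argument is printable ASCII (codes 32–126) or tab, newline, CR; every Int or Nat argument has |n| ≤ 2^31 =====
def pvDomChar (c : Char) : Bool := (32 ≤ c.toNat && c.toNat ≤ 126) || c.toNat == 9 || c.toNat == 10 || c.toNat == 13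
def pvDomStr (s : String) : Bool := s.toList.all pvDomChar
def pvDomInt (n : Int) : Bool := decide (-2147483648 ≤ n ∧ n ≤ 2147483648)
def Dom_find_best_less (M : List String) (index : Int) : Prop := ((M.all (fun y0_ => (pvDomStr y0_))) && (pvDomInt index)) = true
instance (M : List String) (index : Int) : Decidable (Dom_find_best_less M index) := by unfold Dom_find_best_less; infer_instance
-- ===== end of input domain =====

-- B groups the strings by their character at index into a dict in one pass, then answers
-- by lookups and a length comparison, instead of A's count pass plus a second filter pass.

-- ===== PORT A =====
def find_best_less (M : List String) (index : Int) : List String :=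
  let nb_of_one : Int :=
    (M.map (fun elt => if PySem.Str.pyGet? elt index == some '1' then (1 : Int) else 0)).sum
  if nb_of_one = (M.length : Int) ∨ nb_of_one = 0 then M
  else if nb_of_one * 2 = (M.length : Int) then
    M.filter (fun i => PySem.Str.pyGet? i index == some '0')
  else
    let less : Char := if nb_of_one * 2 < (M.length : Int) then '1' else '0'
    M.filter (fun elt => PySem.Str.pyGet? elt index == some less)

-- ===== PORT B =====
-- groups.setdefault(e[index], []).append(e)  ==  modify key [] (· ++ [e])
def find_best_less_alt (M : List String) (index : Int) : List String :=
  let groups : PySem.Dict (Option Char) (List String) :=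
    M.foldl (fun d e => d.modify (PySem.Str.pyGet? e index) [] (· ++ [e])) PySem.Dict.empty
  let ones := groups.getD (some '1') []
  let nb := ones.length
  if nb = M.length ∨ nb = 0 then M
  else if nb * 2 < M.length then ones else groups.getD (some '0') []

-- ===== PRECONDITION & SPEC =====
-- Pre_ excludes exactly the inputs on which Python A raises IndexError: some string of M
-- does not admit the (possibly negative) index.
def Pre_find_best_less (M : List String) (index : Int) : Prop :=
  ∀ s ∈ M, -(s.toList.length : Int) ≤ index ∧ index < (s.toList.length : Int)
instance (M : List String) (index : Int) : Decidable (Pre_find_best_less M index) := by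
  unfold Pre_find_best_less; infer_instance
def pvWitness_find_best_less : List String × Int := (["10", "01", "11"], 0)

def Spec_find_best_less (M : List String) (index : Int) (out : List String) : Prop := out = find_best_less_alt M index
instance (M : List String) (index : Int) (out : List String) : Decidable (Spec_find_best_less M index out) := by unfold Spec_find_best_less; infer_instance

-- ===== CLAIM =====
def Claim_equal_find_best_less : Prop := ∀ (M : List String) (index : Int), Dom_find_best_less M index → Pre_find_best_less M index → Spec_find_best_less M index (find_best_less M index)

-- ===== LEMMAS AND PROOFS =====

-- sum of 0/1 indicators = length of the filtered list
theorem pv_sum_indicator (M : List String) (p : String → Bool) :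
    (M.map (fun e => if p e then (1 : Int) else 0)).sum = ((M.filter p).length : Int) := by
  induction M with
  | nil => simp
  | cons x xs ih =>
    by_cases h : p x <;> simp [h, ih]; omega

-- the grouping dict's entry at c is exactly the filter of M by key = c
theorem pv_groups_getD {α : Type} (k : α → Option Char) (M : List α)
    (d : PySem.Dict (Option Char) (List α)) (c : Option Char) :
    (M.foldl (fun d e => d.modify (k e) [] (· ++ [e])) d).getD c []
      = d.getD c [] ++ M.filter (fun e => k e == c) := by
  induction M generalizing d with
  | nil => simp
  | cons x xs ih =>
    simp only [List.foldl_cons, List.filter_cons]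
    rw [ih, PySem.Dict.getD_modify]
    by_cases h : k x = c
    · simp [h]
    · have h' : (k x == c) = false := by simp [h]
      simp only [h', if_neg (fun hc : c = k x => h hc.symm)]
      simp

-- ===== VERDICT =====
theorem find_best_less_spec : Claim_equal_find_best_less := by
  intro M index _ _
  unfold Spec_find_best_less find_best_less find_best_less_alt
  simp only [pv_sum_indicator M (fun e => PySem.Str.pyGet? e index == some '1'),
    pv_groups_getD (fun e => PySem.Str.pyGet? e index) M PySem.Dict.empty]
  simp only [PySem.Dict.getD_empty, List.nil_append]
  set ones := M.filter (fun e => PySem.Str.pyGet? e index == some '1') with hones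
  split_ifs with h1 h2 h3 h4 h5 <;> first
    | rfl
    | omega
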